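-- pv_equiv track=rewrite | github.com/trouties/lidar-slam-lanelet2 | src/benchmarks/gnss_denial.py | make_prior_indices
-- ===== SOURCE A (Python) =====
-- def make_prior_indices(
--     n_frames: int,
--     denial_start: int,
--     denial_end: int,
--     prior_stride: int = 50,
-- ) -> list[int]:
--     """Build frame indices where absolute priors should be added.
--
--     Frame 0 always gets a prior.  Outside the denial window, priors are
--     added every *prior_stride* frames.  Inside the window, no priors.
--
--     Args:
--         n_frames: Total number of frames.
--         denial_start: First frame of denial window (inclusive).
--         denial_end: Last frame of denial window (inclusive).
--         prior_stride: Add a prior every N frames outside the window.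
--
--     Returns:
--         Sorted list of frame indices.
--     """
--     indices = {0}
--     for i in range(0, n_frames, prior_stride):
--         if i < denial_start or i > denial_end:
--             indices.add(i)
--     return sorted(indices)
-- ===== SOURCE B (Python) =====
-- def make_prior_indices(
--     n_frames: int,
--     denial_start: int,
--     denial_end: int,
--     prior_stride: int = 50,
-- ) -> list[int]:
--     """Compute the prior frames directly from the window boundaries.
--
--     The stride multiples before the denial window form one range ending at
--     the window start; those after it form one range starting at the first
--     multiple past the window end.  Frame 0 always gets a prior.
--     """
--     head = range(0, min(n_frames, denial_start), prior_stride)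
--     first_after = (denial_end // prior_stride + 1) * prior_stride
--     tail = range(max(first_after, 0), n_frames, prior_stride)
--     return sorted({0, *head, *tail})
-- ===== Notes on version B (the rewrite author's own statement) =====
-- stated objective: alternative
-- what changed: A scans every stride multiple and tests each against the denial window; B derives the qualifying multiples directly from the window boundaries as two arithmetic ranges (multiples below the window start, multiples from the first multiple past the window end) merged with frame 0. Pre_ restricts to prior_stride >= 1, the function's natural domain: stride 0 makes range() raise ValueError in both programs, and a negative stride (priors every -N frames is meaningless) makes A walk range() downward, an accident B does not reproduce.
-- outside the precondition, e.g. on make_prior_indices(-10, -5, -1, -2): A returns [-8, -6, 0], B returns [-8, -6, -4, -2, 0]; on make_prior_indices(10, 3, 7, 0): A raises ValueError, B raises ValueError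
import Mathlib
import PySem

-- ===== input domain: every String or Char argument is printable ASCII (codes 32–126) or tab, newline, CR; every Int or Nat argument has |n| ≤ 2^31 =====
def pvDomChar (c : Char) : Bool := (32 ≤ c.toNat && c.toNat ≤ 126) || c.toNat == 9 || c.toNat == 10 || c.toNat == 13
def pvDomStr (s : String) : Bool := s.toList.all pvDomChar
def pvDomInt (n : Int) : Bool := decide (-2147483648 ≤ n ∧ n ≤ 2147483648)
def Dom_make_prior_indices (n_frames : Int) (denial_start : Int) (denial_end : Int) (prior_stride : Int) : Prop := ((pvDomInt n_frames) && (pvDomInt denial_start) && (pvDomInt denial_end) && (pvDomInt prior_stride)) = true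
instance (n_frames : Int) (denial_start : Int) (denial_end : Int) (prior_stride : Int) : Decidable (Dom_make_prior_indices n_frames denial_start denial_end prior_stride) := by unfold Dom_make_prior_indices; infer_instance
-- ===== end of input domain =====

-- B replaces A's filtered scan over every stride multiple by two boundary-derived
-- ranges (multiples below the window, multiples from the first multiple past it)
-- merged with frame 0 (objective: alternative decomposition).

-- ===== PORT A =====
def make_prior_indices (n_frames : Int) (denial_start : Int) (denial_end : Int) (prior_stride : Int) : List Int :=
  -- indices = {0}
  let indices : PySem.Set Int := PySem.Set.add PySem.Set.empty 0
  -- for i in range(0, n_frames, prior_stride): if i < denial_start or i > denial_end: indices.add(i)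
  let indices := (PySem.List.pyRange 0 n_frames prior_stride).foldl
    (fun acc i => if i < denial_start ∨ denial_end < i then PySem.Set.add acc i else acc) indices
  -- return sorted(indices)
  PySem.List.sorted indices (fun x => x)

-- ===== PORT B =====
def make_prior_indices_alt (n_frames : Int) (denial_start : Int) (denial_end : Int) (prior_stride : Int) : List Int :=
  let head := PySem.List.pyRange 0 (min n_frames denial_start) prior_stride
  let first_after := (PySem.Int.floordiv denial_end prior_stride + 1) * prior_stride
  let tail := PySem.List.pyRange (max first_after 0) n_frames prior_stride
  -- sorted({0, *head, *tail})
  PySem.List.sorted (PySem.Set.ofList (0 :: (head ++ tail))) (fun x => x)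

-- ===== PRECONDITION & SPEC =====
-- Pre_ restricts to prior_stride ≥ 1, the function's natural domain ('a prior every N
-- frames'): at stride 0 both programs raise ValueError (range with zero step), and at a
-- negative stride A's value is an accident of range() iterating downward, which B does
-- not reproduce.
def Pre_make_prior_indices (n_frames : Int) (denial_start : Int) (denial_end : Int) (prior_stride : Int) : Prop := 1 ≤ prior_stride
instance (n_frames : Int) (denial_start : Int) (denial_end : Int) (prior_stride : Int) : Decidable (Pre_make_prior_indices n_frames denial_start denial_end prior_stride) := by unfold Pre_make_prior_indices; infer_instance
def pvWitness_make_prior_indices : Int × Int × Int × Int := (10, 3, 7, 2)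

def Spec_make_prior_indices (n_frames : Int) (denial_start : Int) (denial_end : Int) (prior_stride : Int) (out : List Int) : Prop := out = make_prior_indices_alt n_frames denial_start denial_end prior_stride
instance (n_frames : Int) (denial_start : Int) (denial_end : Int) (prior_stride : Int) (out : List Int) : Decidable (Spec_make_prior_indices n_frames denial_start denial_end prior_stride out) := by unfold Spec_make_prior_indices; infer_instance

-- ===== CLAIM =====
def Claim_equal_make_prior_indices : Prop := ∀ (n_frames : Int) (denial_start : Int) (denial_end : Int) (prior_stride : Int), Dom_make_prior_indices n_frames denial_start denial_end prior_stride → Pre_make_prior_indices n_frames denial_start denial_end prior_stride → Spec_make_prior_indices n_frames denial_start denial_end prior_stride (make_prior_indices n_frames denial_start denial_end prior_stride)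

-- ===== LEMMAS AND PROOFS =====

-- membership in A's accumulated set
lemma pv_mem_foldl_cond_add (ds de : Int) (l acc : List Int) (x : Int) :
    x ∈ l.foldl (fun acc i => if i < ds ∨ de < i then PySem.Set.add acc i else acc) acc ↔
      x ∈ acc ∨ (x ∈ l ∧ (x < ds ∨ de < x)) := by
  induction l generalizing acc with
  | nil => simp
  | cons i t ih =>
    simp only [List.foldl_cons, ih, List.mem_cons]
    split_ifs with h
    · rw [PySem.Set.mem_add]
      constructor
      · rintro ((hx | rfl) | ⟨hm, hc⟩)
        · exact Or.inl hx
        · exact Or.inr ⟨Or.inl rfl, h⟩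
        · exact Or.inr ⟨Or.inr hm, hc⟩
      · rintro (hx | ⟨(rfl | hm), hc⟩)
        · exact Or.inl (Or.inl hx)
        · exact Or.inl (Or.inr rfl)
        · exact Or.inr ⟨hm, hc⟩
    · constructor
      · rintro (hx | ⟨hm, hc⟩)
        · exact Or.inl hx
        · exact Or.inr ⟨Or.inr hm, hc⟩
      · rintro (hx | ⟨(rfl | hm), hc⟩)
        · exact Or.inl hx
        · exact absurd hc h
        · exact Or.inr ⟨hm, hc⟩

lemma pv_nodup_foldl_cond_add (ds de : Int) (l acc : List Int) (h : acc.Nodup) :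
    (l.foldl (fun acc i => if i < ds ∨ de < i then PySem.Set.add acc i else acc) acc).Nodup := by
  induction l generalizing acc with
  | nil => exact h
  | cons i t ih =>
    simp only [List.foldl_cons]
    split_ifs with hc
    · exact ih _ (PySem.Set.nodup_add acc i h)
    · exact ih _ h

-- for a nonnegative multiple of s, lying past the window end is the same as lying at or
-- beyond the first multiple after it
lemma pv_after_window {s de x : Int} (hs : 0 < s) (hd : s ∣ x) :
    de < x ↔ (PySem.Int.floordiv de s + 1) * s ≤ x := by
  obtain ⟨k, rfl⟩ := hd
  obtain ⟨h1, h2⟩ := (PySem.Int.floordiv_eq_iff_of_pos (a := de) (q := PySem.Int.floordiv de s) hs).mp rfl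
  constructor
  · intro h
    by_contra hcon
    push Not at hcon
    have hk : k < PySem.Int.floordiv de s + 1 :=
      lt_of_mul_lt_mul_left (by nlinarith) hs.le
    have hkq : k ≤ PySem.Int.floordiv de s := by omega
    nlinarith [mul_le_mul_of_nonneg_left hkq hs.le]
  · intro h
    nlinarith

theorem pv_main (n ds de s : Int) (hpos : 0 < s) :
    make_prior_indices n ds de s = make_prior_indices_alt n ds de s := by
  unfold make_prior_indices make_prior_indices_alt
  set fa : Int := (PySem.Int.floordiv de s + 1) * s with hfa
  apply PySem.List.sorted_eq_sorted_of_perm _ _ _ (fun a b h => h)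
  have hndA : (List.foldl (fun acc i => if i < ds ∨ de < i then PySem.Set.add acc i else acc)
      (PySem.Set.add PySem.Set.empty 0) (PySem.List.pyRange 0 n s)).Nodup :=
    pv_nodup_foldl_cond_add _ _ _ _ (by simp [PySem.Set.add, PySem.Set.empty])
  rw [List.perm_ext_iff_of_nodup hndA (PySem.Set.nodup_ofList _)]
  intro x
  rw [pv_mem_foldl_cond_add, PySem.Set.mem_ofList, List.mem_cons, List.mem_append,
    PySem.List.mem_pyRange_iff_of_pos hpos, PySem.List.mem_pyRange_iff_of_pos hpos,
    PySem.List.mem_pyRange_iff_of_pos hpos]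
  have hdvd_fa : s ∣ fa := ⟨PySem.Int.floordiv de s + 1, by rw [hfa]; ring⟩
  have hdvd_m : s ∣ max fa 0 := by
    rcases max_cases fa 0 with ⟨h, _⟩ | ⟨h, _⟩ <;> rw [h]
    · exact hdvd_fa
    · exact dvd_zero s
  have hsub : ∀ y : Int, (s ∣ y - max fa 0) ↔ s ∣ y := by
    intro y
    constructor
    · intro h; have := dvd_add h hdvd_m; simpa using this
    · intro h; exact dvd_sub h hdvd_m
  have hmem0 : ∀ y : Int, (y ∈ PySem.Set.add PySem.Set.empty (0 : Int)) ↔ y = 0 := by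
    intro y
    rw [PySem.Set.mem_add]
    simp [PySem.Set.empty]
  simp only [hmem0, sub_zero, hsub]
  constructor
  · rintro (rfl | ⟨⟨hx0, hxn, hd⟩, hc⟩)
    · exact Or.inl rfl
    · refine Or.inr ?_
      rcases hc with hlt | hgt
      · exact Or.inl ⟨hx0, lt_min hxn hlt, hd⟩
      · have := (pv_after_window hpos hd).mp hgt
        exact Or.inr ⟨max_le this hx0, hxn, hd⟩
  · rintro (rfl | (⟨hx0, hxm, hd⟩ | ⟨hxm, hxn, hd⟩))
    · exact Or.inl rfl
    · exact Or.inr ⟨⟨hx0, lt_of_lt_of_le hxm (min_le_left _ _), hd⟩,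
        Or.inl (lt_of_lt_of_le hxm (min_le_right _ _))⟩
    · have hx0 : 0 ≤ x := le_trans (le_max_right _ _) hxm
      have hgt : de < x := (pv_after_window hpos hd).mpr (le_trans (le_max_left _ _) hxm)
      exact Or.inr ⟨⟨hx0, hxn, hd⟩, Or.inr hgt⟩

-- ===== VERDICT (by name: the statement is the Claim_ definition above) =====
theorem make_prior_indices_spec : Claim_equal_make_prior_indices := by
  intro n ds de s _ hs
  unfold Spec_make_prior_indices
  exact pv_main n ds de s (by exact_mod_cast hs)
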